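-- pv_equiv track=rewrite | github.com/CardiAP/DesktopApp | sparks/sparks_analysis.py | time_to_peak
-- ===== SOURCE A (Python) =====
-- def time_to_peak (cantidad_sparks, maximum_time, minimum_time):
--     sparks_tiempo_al_pico = []
--     for sp in range  (0, cantidad_sparks):
--         if  ('nan' not in maximum_time or 'nan' not in minimum_time):
--             sp_ttp = maximum_time[sp] - minimum_time [sp]
--             sparks_tiempo_al_pico.append(sp_ttp)
--         else:
--             sparks_tiempo_al_pico.append('nan')
--     return sparks_tiempo_al_pico
-- ===== SOURCE B (Python) =====
-- def time_to_peak(cantidad_sparks, maximum_time, minimum_time):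
--     n = max(cantidad_sparks, 0)
--     return [mx - mn for mx, mn in zip(maximum_time[:n], minimum_time[:n])]
-- ===== Notes on version B (the rewrite author's own statement) =====
-- stated objective: faster
-- what changed: B drops the per-iteration 'nan' membership test (vacuously false on integer data) and the index loop, pairing the two slices with zip and mapping subtraction over the pairs.
import Mathlib
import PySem

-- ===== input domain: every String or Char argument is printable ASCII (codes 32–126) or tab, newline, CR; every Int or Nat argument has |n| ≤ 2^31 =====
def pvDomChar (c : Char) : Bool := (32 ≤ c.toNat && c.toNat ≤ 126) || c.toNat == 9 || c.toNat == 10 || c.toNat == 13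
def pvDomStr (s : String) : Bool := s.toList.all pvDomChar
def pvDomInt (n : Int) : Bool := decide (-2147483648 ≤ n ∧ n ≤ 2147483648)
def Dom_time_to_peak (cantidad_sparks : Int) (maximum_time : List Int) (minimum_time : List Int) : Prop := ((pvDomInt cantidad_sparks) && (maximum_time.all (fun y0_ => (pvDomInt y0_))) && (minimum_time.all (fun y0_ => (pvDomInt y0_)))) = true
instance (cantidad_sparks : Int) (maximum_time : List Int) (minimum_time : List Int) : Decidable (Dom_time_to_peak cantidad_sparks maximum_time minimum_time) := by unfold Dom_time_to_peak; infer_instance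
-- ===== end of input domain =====

-- B hoists A's loop-invariant 'nan' membership test (vacuously false on integer data, so the
-- branch is always the arithmetic one) out of the loop and pairs the two list prefixes with
-- zip, mapping subtraction; simpler, same result on Pre_. Return value only, no mutation.

-- ===== PORT A =====
-- The test `'nan' not in maximum_time or 'nan' not in minimum_time` is always True on lists of
-- ints (a string is never an element), so the branch taken is always the subtraction branch.
-- maximum_time[sp] / minimum_time[sp] are in range under Pre_; pyGetD's default 0 is unreachable.
def time_to_peak (cantidad_sparks : Int) (maximum_time : List Int) (minimum_time : List Int) : List Int :=
  (PySem.List.pyRange 0 cantidad_sparks 1).foldl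
    (fun sparks_tiempo_al_pico sp =>
      sparks_tiempo_al_pico ++
        [PySem.List.pyGetD maximum_time sp 0 - PySem.List.pyGetD minimum_time sp 0])
    []

-- ===== PORT B =====
def time_to_peak_alt (cantidad_sparks : Int) (maximum_time : List Int) (minimum_time : List Int) : List Int :=
  let n := (max cantidad_sparks 0).toNat
  ((maximum_time.take n).zip (minimum_time.take n)).map (fun p => p.1 - p.2)

-- ===== PRECONDITION & SPEC =====
-- Pre_ excludes exactly the inputs where A raises IndexError: an index sp < cantidad_sparks
-- beyond the end of either list.
def Pre_time_to_peak (cantidad_sparks : Int) (maximum_time : List Int) (minimum_time : List Int) : Prop :=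
  cantidad_sparks ≤ (maximum_time.length : Int) ∧ cantidad_sparks ≤ (minimum_time.length : Int)
instance (cantidad_sparks : Int) (maximum_time : List Int) (minimum_time : List Int) : Decidable (Pre_time_to_peak cantidad_sparks maximum_time minimum_time) := by unfold Pre_time_to_peak; infer_instance

def pvWitness_time_to_peak : Int × List Int × List Int := (2, [10, 20, 30], [3, 5])

def Spec_time_to_peak (cantidad_sparks : Int) (maximum_time : List Int) (minimum_time : List Int) (out : List Int) : Prop := out = time_to_peak_alt cantidad_sparks maximum_time minimum_time
instance (cantidad_sparks : Int) (maximum_time : List Int) (minimum_time : List Int) (out : List Int) : Decidable (Spec_time_to_peak cantidad_sparks maximum_time minimum_time out) := by unfold Spec_time_to_peak; infer_instance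

-- ===== CLAIM (what is proved, stated in full; the proofs are below) =====
def Claim_equal_time_to_peak : Prop := ∀ (cantidad_sparks : Int) (maximum_time : List Int) (minimum_time : List Int), Dom_time_to_peak cantidad_sparks maximum_time minimum_time → Pre_time_to_peak cantidad_sparks maximum_time minimum_time → Spec_time_to_peak cantidad_sparks maximum_time minimum_time (time_to_peak cantidad_sparks maximum_time minimum_time)

-- ===== LEMMAS AND PROOFS =====

-- ===== VERDICT (by name: the statement is the Claim_ definition above) =====
theorem time_to_peak_spec : Claim_equal_time_to_peak := by
  intro cs maxt mint _hDom hPre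
  unfold Spec_time_to_peak time_to_peak time_to_peak_alt
  obtain ⟨h1, h2⟩ := hPre
  rw [PySem.List.foldl_append_singleton_eq_map, List.nil_append]
  rw [PySem.List.pyRange_one 0 cs]
  apply List.ext_getElem
  · simp
    omega
  · intro k hk1 hk2
    have hkcs : (k : Int) < cs := by simp at hk1; omega
    have hk0 : 0 ≤ (k : Int) := Int.natCast_nonneg k
    have hmk : k < maxt.length := by omega
    have hnk : k < mint.length := by omega
    simp [hmk, hnk, PySem.List.pyGetD_eq_getElem]
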